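-- pv_equiv track=rewrite | github.com/Kapok-uii/worker-allocation | worker-assign/DGWO/src/critical_path_regulation.py | mach_worker_set
-- ===== SOURCE A (Python) =====
-- def mach_worker_set ( machine_schedul,mach_result):
--     empty_A = [[[] for _ in machine] for machine in machine_schedul]
--     for i in range(len(machine_schedul)):
--         for j, task in enumerate(machine_schedul[i]):
--             for k in mach_result[i]:
--                 worker_id = k[0]
--                 empty_A[i][j].append(worker_id)
--     return empty_A
-- ===== SOURCE B (Python) =====
-- def mach_worker_set(machine_schedul, mach_result):
--     # Structural recursion on the machine list: build each row from one
--     # comprehension over mach_result[0], each task getting its own copy.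
--     if not machine_schedul:
--         return []
--     head = machine_schedul[0]
--     workers = [k[0] for k in mach_result[0]] if head else []
--     return [[workers[:] for _ in head]] + mach_worker_set(machine_schedul[1:], mach_result[1:])
-- ===== Notes on version B (the rewrite author's own statement) =====
-- stated objective: alternative
-- what changed: B is a structural recursion on the machine list that constructs each output row directly from one comprehension over mach_result[0] and recurses on the tails, instead of A's pre-built empty template mutated in place by a triple-nested index loop that rescans mach_result[i] and appends worker ids element by element.
import Mathlib
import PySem

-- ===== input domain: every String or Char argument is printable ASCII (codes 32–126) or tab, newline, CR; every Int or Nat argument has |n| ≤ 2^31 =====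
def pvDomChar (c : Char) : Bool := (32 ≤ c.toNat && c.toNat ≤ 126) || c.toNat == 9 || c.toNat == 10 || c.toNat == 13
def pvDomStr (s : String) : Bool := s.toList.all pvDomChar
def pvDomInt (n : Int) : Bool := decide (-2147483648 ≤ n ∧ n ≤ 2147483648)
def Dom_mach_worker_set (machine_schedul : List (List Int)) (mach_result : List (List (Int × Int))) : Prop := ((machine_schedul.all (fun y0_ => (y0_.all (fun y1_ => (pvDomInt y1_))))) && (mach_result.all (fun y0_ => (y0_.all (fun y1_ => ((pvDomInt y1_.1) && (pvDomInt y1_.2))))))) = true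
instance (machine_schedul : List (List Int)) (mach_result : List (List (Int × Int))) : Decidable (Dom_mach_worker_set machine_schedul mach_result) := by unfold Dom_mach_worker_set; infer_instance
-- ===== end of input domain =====

-- B replaces A's template-then-triple-nested-mutation with a structural recursion on the machine list (objective: alternative decomposition).

-- ===== PORT A =====
-- Literal port of A: build the empty template, then triple-nested loops appending
-- worker ids cell by cell (list mutation ported as List.modify at the indices).
-- Python's enumerate(machine_schedul[i]) is ported as zipIdx (pairs (task, j));
-- mach_result[i] is ported as getD: where Python raises IndexError (i ≥ len(mach_result)
-- with a nonempty machine row) the input is excluded by Pre_mach_worker_set.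
def mach_worker_set (machine_schedul : List (List Int)) (mach_result : List (List (Int × Int))) : List (List (List Int)) :=
  let empty_A := machine_schedul.map (fun machine => machine.map (fun _ => ([] : List Int)))
  (List.range machine_schedul.length).foldl (fun A i =>
    ((machine_schedul.getD i []).zipIdx).foldl (fun A tj =>
      (mach_result.getD i []).foldl (fun A k =>
        A.modify i (fun row => row.modify tj.2 (fun cell => cell ++ [k.1]))) A) A) empty_A

-- ===== PORT B =====
-- Literal port of B: structural recursion on the machine list; the row is one map over
-- the head machine replicating the worker-id list built from mach_result[0]
-- (mach_result[0] is read only when the head machine is nonempty, as in Source B;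
-- per-task copies of the Python list are implicit in Lean).
def mach_worker_set_alt : List (List Int) → List (List (Int × Int)) → List (List (List Int))
  | [], _ => []
  | head :: rest, mr =>
      let workers := if head ≠ [] then (mr.headD []).map Prod.fst else []
      (head.map fun _ => workers) :: mach_worker_set_alt rest mr.tail

-- ===== PRECONDITION & SPEC =====
-- Pre_ excludes exactly the inputs where the Python A raises IndexError: a machine with a
-- nonempty task list at an index i with no mach_result[i] (B raises there too).
def Pre_mach_worker_set (machine_schedul : List (List Int)) (mach_result : List (List (Int × Int))) : Prop :=
  ∀ p ∈ machine_schedul.zipIdx, p.1 ≠ [] → p.2 < mach_result.length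
instance (machine_schedul : List (List Int)) (mach_result : List (List (Int × Int))) : Decidable (Pre_mach_worker_set machine_schedul mach_result) := by unfold Pre_mach_worker_set; infer_instance
def pvWitness_mach_worker_set : List (List Int) × (List (List (Int × Int))) :=
  ([[1, 2], [3]], [[(7, 1), (8, 2)], [(9, 3)]])
def Spec_mach_worker_set (machine_schedul : List (List Int)) (mach_result : List (List (Int × Int))) (out : List (List (List Int))) : Prop := out = mach_worker_set_alt machine_schedul mach_result
instance (machine_schedul : List (List Int)) (mach_result : List (List (Int × Int))) (out : List (List (List Int))) : Decidable (Spec_mach_worker_set machine_schedul mach_result out) := by unfold Spec_mach_worker_set; infer_instance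

-- ===== CLAIM (what is proved, stated in full; the proofs are below) =====
def Claim_equal_mach_worker_set : Prop := ∀ (machine_schedul : List (List Int)) (mach_result : List (List (Int × Int))), Dom_mach_worker_set machine_schedul mach_result → Pre_mach_worker_set machine_schedul mach_result → Spec_mach_worker_set machine_schedul mach_result (mach_worker_set machine_schedul mach_result)

-- ===== LEMMAS AND PROOFS =====

theorem pv_modify_modify {α : Type} (l : List α) (i : Nat) (f g : α → α) :
    (l.modify i f).modify i g = l.modify i (fun a => g (f a)) := by
  induction l generalizing i with
  | nil => simp
  | cons a t ih => cases i <;> simp [ih]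

theorem pv_kfold (L : List (Int × Int)) (A : List (List (List Int))) (i j : Nat) :
    L.foldl (fun A k => A.modify i (fun row => row.modify j (fun cell => cell ++ [k.1]))) A
      = A.modify i (fun row => row.modify j (fun cell => cell ++ L.map Prod.fst)) := by
  induction L generalizing A with
  | nil =>
      simp only [List.foldl_nil, List.map_nil, List.append_nil]
      rw [show (fun (row : List (List Int)) => row.modify j fun cell => cell) = fun row => row
        from funext fun row => List.modify_id j row]
      exact (List.modify_id i A).symm
  | cons k L ih =>
      simp only [List.foldl_cons, ih, pv_modify_modify]
      congr 1
      funext row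
      congr 1
      funext cell
      simp

theorem pv_hoist {β : Type} (L : List β) (A : List (List (List Int))) (i : Nat)
    (f : β → List (List Int) → List (List Int)) :
    L.foldl (fun A x => A.modify i (f x)) A = A.modify i (fun r => L.foldl (fun r x => f x r) r) := by
  induction L generalizing A with
  | nil => exact (List.modify_id i A).symm
  | cons x L ih => simp only [List.foldl_cons, ih, pv_modify_modify]

theorem pv_modify_at_length {α : Type} (pre : List α) (c : α) (ct : List α) (f : α → α) :
    (pre ++ c :: ct).modify pre.length f = pre ++ f c :: ct := by
  induction pre with
  | nil => simp
  | cons a t ih => simp [ih]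

theorem pv_rowfold (W : List Int) (machine : List Int) (pre row : List (List Int))
    (h : row.length = machine.length) :
    (machine.zipIdx pre.length).foldl (fun r tj => r.modify tj.2 (fun cell => cell ++ W)) (pre ++ row)
      = pre ++ row.map (fun cell => cell ++ W) := by
  induction machine generalizing pre row with
  | nil =>
      simp only [List.length_nil] at h
      rw [List.eq_nil_of_length_eq_zero h]
      simp
  | cons m mt ih =>
      cases row with
      | nil => simp at h
      | cons c ct =>
          simp only [List.zipIdx_cons, List.foldl_cons, pv_modify_at_length]
          have := ih (pre ++ [c ++ W]) ct (by simpa using h)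
          simp only [List.length_append, List.length_cons, List.length_nil] at this
          simpa using this

theorem pv_getD_tail {α : Type} (l : List α) (i : Nat) (d : α) : l.getD (i + 1) d = l.tail.getD i d := by
  cases l <;> simp

-- the outer-loop body of port A, named for the proof
def pvStepA (ms : List (List Int)) (mr : List (List (Int × Int))) (A : List (List (List Int))) (i : Nat) : List (List (List Int)) :=
  ((ms.getD i []).zipIdx).foldl (fun A tj =>
    (mr.getD i []).foldl (fun A k =>
      A.modify i (fun row => row.modify tj.2 (fun cell => cell ++ [k.1]))) A) A

theorem pvA_unfold (ms : List (List Int)) (mr : List (List (Int × Int))) :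
    mach_worker_set ms mr
      = (List.range ms.length).foldl (pvStepA ms mr) (ms.map (fun machine => machine.map (fun _ => ([] : List Int)))) := rfl

theorem pvStepA_eq (ms : List (List Int)) (mr : List (List (Int × Int))) (A : List (List (List Int))) (i : Nat) :
    pvStepA ms mr A i
      = A.modify i (fun r => ((ms.getD i []).zipIdx).foldl
          (fun r tj => r.modify tj.2 (fun cell => cell ++ (mr.getD i []).map Prod.fst)) r) := by
  unfold pvStepA
  simp only [pv_kfold]
  rw [pv_hoist]

theorem pvStepA_succ (m : List Int) (mt : List (List Int)) (mr : List (List (Int × Int)))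
    (h : List (List Int)) (t : List (List (List Int))) (i : Nat) :
    pvStepA (m :: mt) mr (h :: t) (i + 1) = h :: pvStepA mt mr.tail t i := by
  rw [pvStepA_eq, pvStepA_eq]
  simp only [List.modify_succ_cons, pv_getD_tail, List.tail_cons]

theorem pv_shift (idxs : List Nat) (m : List Int) (mt : List (List Int)) (mr : List (List (Int × Int)))
    (h : List (List Int)) (t : List (List (List Int))) :
    idxs.foldl (fun A i => pvStepA (m :: mt) mr A (i + 1)) (h :: t)
      = h :: idxs.foldl (pvStepA mt mr.tail) t := by
  induction idxs generalizing t with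
  | nil => rfl
  | cons i idxs ih => simp only [List.foldl_cons, pvStepA_succ, ih]

theorem pvA_eq_alt (ms : List (List Int)) (mr : List (List (Int × Int))) :
    mach_worker_set ms mr = mach_worker_set_alt ms mr := by
  rw [pvA_unfold]
  induction ms generalizing mr with
  | nil => simp [mach_worker_set_alt]
  | cons m mt ih =>
      rw [List.length_cons, List.range_succ_eq_map, List.foldl_cons, List.foldl_map]
      have hW : mr.getD 0 [] = mr.headD [] := by cases mr <;> simp
      have hrow : (m.map fun _ => (mr.headD []).map Prod.fst)
          = m.map (fun _ => if m ≠ [] then (mr.headD []).map Prod.fst else []) := by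
        cases m <;> simp
      have h0 : pvStepA (m :: mt) mr ((m :: mt).map (fun machine => machine.map (fun _ => ([] : List Int)))) 0
          = (m.map fun _ => (mr.headD []).map Prod.fst) :: mt.map (fun machine => machine.map (fun _ => ([] : List Int))) := by
        rw [pvStepA_eq]
        have hr := pv_rowfold ((mr.getD 0 []).map Prod.fst) m ([] : List (List Int))
          (m.map (fun _ => ([] : List Int))) (by simp)
        simp only [List.length_nil, List.nil_append] at hr
        simp only [List.map_cons, List.modify_zero_cons, List.getD_cons_zero]
        rw [hr, List.map_map, hW]
        rfl
      simp only [Nat.succ_eq_add_one]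
      rw [h0, pv_shift, ih mr.tail]
      simp only [mach_worker_set_alt]
      rw [hrow]

-- ===== VERDICT (by name: the statement is the Claim_ definition above) =====
theorem mach_worker_set_spec : Claim_equal_mach_worker_set := by
  intro ms mr _ _
  unfold Spec_mach_worker_set
  exact pvA_eq_alt ms mr
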